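-- pv_equiv track=rewrite | github.com/LeeHyeonKyu/Coding-Practice | Programmers/연습문제/124 나라의 숫자.py | solution
-- ===== SOURCE A (Python) =====
-- def solution(n):
--     answer = ''
--     while n > 0 :
--         q, r = divmod(n, 3)
--         if r == 0 :
--             q -= 1
--             r = 3
--         if r == 3 :
--             answer += '4'
--         else :
--             answer += str(r)
--         n = q
--
--     answer = answer[::-1]
--     return answer
-- ===== SOURCE B (Python) =====
-- def solution(n):
--     if n <= 0:
--         return ''
--     q, r = divmod(n, 3)
--     if r == 0:
--         q, r = q - 1, 3
--     return solution(q) + ('4' if r == 3 else str(r))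
-- ===== Notes on version B (the rewrite author's own statement) =====
-- stated objective: simpler
-- what changed: Replaces the iterative low-to-high digit accumulation plus final string reversal with a direct recursion that emits high-order digits first, removing the reverse step and the accumulator.
import Mathlib
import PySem

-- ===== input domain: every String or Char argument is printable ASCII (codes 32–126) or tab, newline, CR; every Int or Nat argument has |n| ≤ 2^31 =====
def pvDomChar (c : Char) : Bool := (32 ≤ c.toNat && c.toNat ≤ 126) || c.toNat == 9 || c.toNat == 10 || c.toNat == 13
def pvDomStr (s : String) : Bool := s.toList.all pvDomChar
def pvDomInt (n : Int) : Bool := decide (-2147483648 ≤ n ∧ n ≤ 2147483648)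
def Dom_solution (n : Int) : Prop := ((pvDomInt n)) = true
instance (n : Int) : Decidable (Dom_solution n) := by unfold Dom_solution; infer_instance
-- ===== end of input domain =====

-- B replaces A's loop that appends digits low-to-high and then reverses by a
-- recursion emitting high-order digits first (objective: simpler; return-value equivalence).

-- termination helper cited by both ports
theorem pv_fdiv3_lt (n : Int) (h : 0 < n) :
    (PySem.Int.floordiv n 3 - 1).toNat < n.toNat ∧ (PySem.Int.floordiv n 3).toNat < n.toNat := by
  rw [PySem.Int.floordiv_eq_ediv_of_pos (by norm_num)]
  omega

-- ===== PORT A =====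
def solutionLoop (n : Int) (answer : String) : String :=
  if h : n > 0 then
    let q := PySem.Int.floordiv n 3
    let r := PySem.Int.mod n 3
    if hr : r = 0 then
      solutionLoop (q - 1) (answer ++ "4")
    else
      if r = 3 then solutionLoop q (answer ++ "4")
      else solutionLoop q (answer ++ PySem.Int.toStr r)
  else answer
termination_by n.toNat
decreasing_by
  · exact (pv_fdiv3_lt n h).1
  · exact (pv_fdiv3_lt n h).2
  · exact (pv_fdiv3_lt n h).2

-- answer[::-1]: step -1 never raises, so slice? is always some; getD is unreachable default
def solution (n : Int) : String :=
  (PySem.Str.slice? (solutionLoop n "") none none (-1)).getD ""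

-- ===== PORT B =====
def solution_alt (n : Int) : String :=
  if h : n ≤ 0 then ""
  else
    let q := PySem.Int.floordiv n 3
    let r := PySem.Int.mod n 3
    if hr : r = 0 then solution_alt (q - 1) ++ "4"
    else solution_alt q ++ (if r = 3 then "4" else PySem.Int.toStr r)
termination_by n.toNat
decreasing_by
  · exact (pv_fdiv3_lt n (by omega)).1
  · exact (pv_fdiv3_lt n (by omega)).2

-- ===== PRECONDITION & SPEC =====
def Spec_solution (n : Int) (out : String) : Prop := out = solution_alt n
instance (n : Int) (out : String) : Decidable (Spec_solution n out) := by unfold Spec_solution; infer_instance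

-- ===== CLAIM (what is proved, stated in full; the proofs are below) =====
def Claim_equal_solution : Prop := ∀ (n : Int), Dom_solution n → Spec_solution n (solution n)

-- ===== LEMMAS AND PROOFS =====

theorem pv_loop_eq (k : Nat) : ∀ (n : Int), n.toNat ≤ k → ∀ (a : String),
    (solutionLoop n a).toList = a.toList ++ (solution_alt n).toList.reverse := by
  induction k with
  | zero =>
    intro n hn a
    have hn0 : ¬ n > 0 := by omega
    rw [solutionLoop, solution_alt]
    simp [hn0, show n ≤ 0 by omega]
  | succ k ih =>
    intro n hn a
    by_cases hp : n > 0
    · have hmod : 0 ≤ PySem.Int.mod n 3 ∧ PySem.Int.mod n 3 < 3 := by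
        rw [PySem.Int.mod_eq_emod_of_pos (by norm_num)]
        exact ⟨Int.emod_nonneg n (by norm_num), Int.emod_lt_of_pos n (by norm_num)⟩
      rw [solutionLoop, solution_alt]
      simp only [hp, dif_pos, show ¬ n ≤ 0 by omega, dif_neg, not_false_iff]
      by_cases hr : PySem.Int.mod n 3 = 0
      · simp only [hr, dif_pos]
        rw [ih _ (by have := (pv_fdiv3_lt n hp).1; omega)]
        simp
      · simp only [hr, dif_neg, not_false_iff,
          show ¬ PySem.Int.mod n 3 = 3 by omega, if_neg]
        have h12 : PySem.Int.mod n 3 = 1 ∨ PySem.Int.mod n 3 = 2 := by omega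
        rw [ih _ (by have := (pv_fdiv3_lt n hp).2; omega)]
        have hm : PySem.Int.mod n 3 = n % 3 := PySem.Int.mod_eq_emod_of_pos (by norm_num)
        rcases h12 with h | h <;> rw [hm] at h <;> simp [h, PySem.Int.toStr] <;> decide
    · rw [solutionLoop, solution_alt]
      simp [hp, show n ≤ 0 by omega]

theorem solution_spec : Claim_equal_solution := by
  intro n _
  unfold Spec_solution solution
  rw [PySem.Str.slice?_none_none_neg_one]
  have h := pv_loop_eq n.toNat n le_rfl ""
  simp only [String.toList_empty, List.nil_append] at h
  apply String.ext  -- strings with equal char lists are equal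
  simp [h]
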